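-- pv_equiv track=rewrite | github.com/shizhenneko/Video-Transformer | src/utils/note_refiner.py | _to_appendix_sections
-- ===== SOURCE A (Python) =====
-- def _convert_heading_level(heading: str, level: int) -> str:
--     text = heading.lstrip("#").strip()
--     return f"{'#' * level} {text}"
--
-- def _to_appendix_sections(lines: list[str]) -> list[str]:
--     converted: list[str] = []
--     for line in lines:
--         if line.startswith("## "):
--             converted.append(_convert_heading_level(line, 3))
--             continue
--         if line.startswith("### "):
--             converted.append(_convert_heading_level(line, 4))
--             continue
--         converted.append(line)
--     return _dedupe_appendix_lines(converted)
--
-- def _dedupe_appendix_lines(lines: list[str]) -> list[str]: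
--     deduped: list[str] = []
--     seen: set[str] = set()
--     for line in lines:
--         if line.startswith("### ") or line.startswith("#### "):
--             deduped.append(line)
--             seen.clear()
--             continue
--         normalized = " ".join(line.strip().split())
--         if not normalized:
--             if deduped and deduped[-1] == "":
--                 continue
--             deduped.append("")
--             continue
--         if normalized in seen:
--             continue
--         seen.add(normalized)
--         deduped.append(normalized)
--     return deduped
-- ===== SOURCE B (Python) =====
-- def _convert_heading_level(heading: str, level: int) -> str:
--     text = heading.lstrip("#").strip()
--     return f"{'#' * level} {text}"
--
--
-- def _convert_line(line: str) -> str: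
--     if line.startswith("## "):
--         return _convert_heading_level(line, 3)
--     if line.startswith("### "):
--         return _convert_heading_level(line, 4)
--     return line
--
--
-- def _is_heading(line: str) -> bool:
--     return line.startswith("### ") or line.startswith("#### ")
--
--
-- def _dedupe_section(section: list[str]) -> list[str]:
--     # Independent dedup of the lines between two headings: fresh seen-set,
--     # and a local flag for collapsing consecutive blank lines.
--     result: list[str] = []
--     seen: set[str] = set()
--     last_blank = False
--     for line in section:
--         normalized = " ".join(line.strip().split())
--         if not normalized:
--             if not last_blank:
--                 result.append("")
--             last_blank = True
--         elif normalized in seen: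
--             continue
--         else:
--             seen.add(normalized)
--             result.append(normalized)
--             last_blank = False
--     return result
--
--
-- def _to_appendix_sections(lines: list[str]) -> list[str]:
--     converted = [_convert_line(line) for line in lines]
--     out: list[str] = []
--     section: list[str] = []
--     for line in converted:
--         if _is_heading(line):
--             out.extend(_dedupe_section(section))
--             out.append(line)
--             section = []
--         else:
--             section.append(line)
--     out.extend(_dedupe_section(section))
--     return out
-- ===== Notes on version B (the rewrite author's own statement) =====
-- stated objective: alternative
-- what changed: B replaces A's single global dedupe loop (mutable seen-set cleared at each heading, blank collapse via deduped[-1]) by a grouping pass: it buffers the lines between headings into sections and runs an independent per-section dedup helper with a fresh set and a local last-blank flag, concatenating headings and deduped sections.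
import Mathlib
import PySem

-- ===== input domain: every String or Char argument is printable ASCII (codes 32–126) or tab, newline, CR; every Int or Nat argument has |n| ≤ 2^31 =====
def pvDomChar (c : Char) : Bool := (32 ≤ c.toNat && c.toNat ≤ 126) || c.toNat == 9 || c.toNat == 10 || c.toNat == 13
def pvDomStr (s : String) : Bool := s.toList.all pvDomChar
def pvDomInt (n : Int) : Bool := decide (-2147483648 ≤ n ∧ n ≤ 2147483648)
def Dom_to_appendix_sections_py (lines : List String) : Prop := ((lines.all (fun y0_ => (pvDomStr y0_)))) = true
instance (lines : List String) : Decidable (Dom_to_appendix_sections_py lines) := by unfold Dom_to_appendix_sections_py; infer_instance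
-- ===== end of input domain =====

-- B groups the converted lines into heading-delimited sections and dedupes each section
-- independently (fresh seen-set, local blank flag) instead of A's single global loop: objective 'alternative'.


-- ===== PORT A =====
-- _convert_heading_level(heading, level); heading.lstrip("#") has no PySem primitive and is
-- hand-ported as dropWhile (· == '#') on the char list (exact: lstrip("#") drops leading '#');
-- f"{'#' * level} {text}" is the char list replicate level '#' ++ ' ' ++ text.
def convertHeadingLevel (heading : String) (level : Nat) : String :=
  let text := PySem.Chars.strip (heading.toList.dropWhile (· == '#'))
  String.ofList (List.replicate level '#' ++ [' '] ++ text)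

-- " ".join(line.strip().split())
def normLine (line : String) : String :=
  PySem.Str.join " " (PySem.Str.split₀ (PySem.Str.strip line))

-- loop body of _dedupe_appendix_lines; state = (deduped, seen);
-- 'deduped and deduped[-1] == ""' is exactly 'deduped.getLast? = some ""'.
def dedupeStepA (st : List String × PySem.Set String) (line : String) :
    List String × PySem.Set String :=
  if PySem.Str.startswith line "### " || PySem.Str.startswith line "#### " then
    (st.1 ++ [line], PySem.Set.empty)   -- seen.clear()
  else
    let normalized := normLine line
    if normalized = "" then
      (if st.1.getLast? = some "" then st else (st.1 ++ [""], st.2))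
    else if normalized ∈ st.2 then st
    else (st.1 ++ [normalized], PySem.Set.add st.2 normalized)

def dedupeAppendixLines (lines : List String) : List String :=
  (lines.foldl dedupeStepA ([], PySem.Set.empty)).1

def to_appendix_sections_py (lines : List String) : List String :=
  dedupeAppendixLines
    (lines.foldl (fun converted line =>
      if PySem.Str.startswith line "## " then converted ++ [convertHeadingLevel line 3]
      else if PySem.Str.startswith line "### " then converted ++ [convertHeadingLevel line 4]
      else converted ++ [line]) [])

-- ===== PORT B =====
def convertLineB (line : String) : String :=
  if PySem.Str.startswith line "## " then convertHeadingLevel line 3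
  else if PySem.Str.startswith line "### " then convertHeadingLevel line 4
  else line

def isHeadingB (line : String) : Bool :=
  PySem.Str.startswith line "### " || PySem.Str.startswith line "#### "

-- loop body of _dedupe_section; state = (result, seen, last_blank)
def dedupeSectionStepB (st : List String × PySem.Set String × Bool) (line : String) :
    List String × PySem.Set String × Bool :=
  let normalized := normLine line
  if normalized = "" then
    ((if st.2.2 then st.1 else st.1 ++ [""]), st.2.1, true)
  else if normalized ∈ st.2.1 then st
  else (st.1 ++ [normalized], PySem.Set.add st.2.1 normalized, false)

def dedupeSectionB (section' : List String) : List String :=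
  (section'.foldl dedupeSectionStepB ([], PySem.Set.empty, false)).1

def to_appendix_sections_py_alt (lines : List String) : List String :=
  let converted := lines.map convertLineB
  let st := converted.foldl (fun (st : List String × List String) line =>
    if isHeadingB line then (st.1 ++ dedupeSectionB st.2 ++ [line], ([] : List String))
    else (st.1, st.2 ++ [line])) ([], [])
  st.1 ++ dedupeSectionB st.2

-- ===== PRECONDITION & SPEC =====
def Spec_to_appendix_sections_py (lines : List String) (out : List String) : Prop := out = to_appendix_sections_py_alt lines
instance (lines : List String) (out : List String) : Decidable (Spec_to_appendix_sections_py lines out) := by unfold Spec_to_appendix_sections_py; infer_instance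

-- ===== CLAIM (what is proved, stated in full; the proofs are below) =====
def Claim_equal_to_appendix_sections_py : Prop := ∀ (lines : List String), Dom_to_appendix_sections_py lines → Spec_to_appendix_sections_py lines (to_appendix_sections_py lines)

-- ===== LEMMAS AND PROOFS =====

-- Reference recursion: A's dedupe loop written consing, with the blank flag made explicit.
def dedupeT (seen : PySem.Set String) (lb : Bool) : List String → List String
  | [] => []
  | l :: ls =>
    if PySem.Str.startswith l "### " || PySem.Str.startswith l "#### " then
      l :: dedupeT PySem.Set.empty false ls
    else if normLine l = "" then
      (if lb then dedupeT seen true ls else "" :: dedupeT seen true ls)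
    else if normLine l ∈ seen then dedupeT seen lb ls
    else normLine l :: dedupeT (PySem.Set.add seen (normLine l)) false ls

-- Section-local recursion (no heading branch), matching _dedupe_section.
def dedupeSecT (seen : PySem.Set String) (lb : Bool) : List String → List String
  | [] => []
  | l :: ls =>
    if normLine l = "" then
      (if lb then dedupeSecT seen true ls else "" :: dedupeSecT seen true ls)
    else if normLine l ∈ seen then dedupeSecT seen lb ls
    else normLine l :: dedupeSecT (PySem.Set.add seen (normLine l)) false ls

-- a heading line starts with "### " or "#### ", hence is not the empty string
theorem heading_ne_empty {l : String} (h : isHeadingB l = true) : l ≠ "" := by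
  intro hl
  subst hl
  exact absurd h (by decide)

theorem foldA_eq_dedupeT (rest : List String) : ∀ (acc : List String) (seen : PySem.Set String),
    (rest.foldl dedupeStepA (acc, seen)).1 = acc ++ dedupeT seen (decide (acc.getLast? = some "")) rest := by
  induction rest with
  | nil => intro acc seen; simp [dedupeT]
  | cons l ls ih =>
    intro acc seen
    cases hb : (PySem.Str.startswith l "### " || PySem.Str.startswith l "#### ") with
    | true =>
      have hne : l ≠ "" := heading_ne_empty (show isHeadingB l = true by simpa [isHeadingB] using hb)
      simp only [List.foldl_cons, dedupeStepA, hb, if_true, dedupeT, ih]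
      simp [hne]
    | false =>
      simp only [List.foldl_cons, dedupeStepA, hb, Bool.false_eq_true, if_false, dedupeT]
      by_cases hn : normLine l = ""
      · by_cases hlb : acc.getLast? = some ""
        · simp [hn, hlb, ih]
        · simp [hn, hlb, ih]
      · by_cases hc : normLine l ∈ seen
        · simp [hn, hc, ih]
        · simp [hn, hc, ih]

theorem foldB_eq_dedupeSecT (seg : List String) :
    ∀ (acc : List String) (seen : PySem.Set String) (lb : Bool),
    (seg.foldl dedupeSectionStepB (acc, seen, lb)).1 = acc ++ dedupeSecT seen lb seg := by
  induction seg with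
  | nil => intro acc seen lb; simp [dedupeSecT]
  | cons l ls ih =>
    intro acc seen lb
    simp only [List.foldl_cons, dedupeSectionStepB, dedupeSecT]
    by_cases hn : normLine l = ""
    · cases lb <;> simp [hn, ih]
    · by_cases hc : normLine l ∈ seen
      · simp [hn, hc, ih]
      · simp [hn, hc, ih]

theorem dedupeT_no_heading (seg : List String) (h : ∀ x ∈ seg, isHeadingB x = false) :
    ∀ seen lb, dedupeT seen lb seg = dedupeSecT seen lb seg := by
  induction seg with
  | nil => intro seen lb; simp [dedupeT, dedupeSecT]
  | cons l ls ih =>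
    intro seen lb
    have hl : (PySem.Str.startswith l "### " || PySem.Str.startswith l "#### ") = false := by
      simpa [isHeadingB] using h l (by simp)
    have hls : ∀ x ∈ ls, isHeadingB x = false := fun x hx => h x (by simp [hx])
    simp only [dedupeT, dedupeSecT, hl, Bool.false_eq_true, if_false]
    by_cases hn : normLine l = ""
    · cases lb <;> simp [hn, ih hls]
    · by_cases hc : normLine l ∈ seen
      · simp [hn, hc, ih hls]
      · simp [hn, hc, ih hls]

theorem dedupeT_split (seg : List String) (h : ∀ x ∈ seg, isHeadingB x = false)
    {l : String} (hl : isHeadingB l = true) (ls : List String) :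
    ∀ seen lb, dedupeT seen lb (seg ++ l :: ls)
      = dedupeSecT seen lb seg ++ l :: dedupeT PySem.Set.empty false ls := by
  induction seg with
  | nil =>
    intro seen lb
    have hb : (PySem.Str.startswith l "### " || PySem.Str.startswith l "#### ") = true := by
      simpa [isHeadingB] using hl
    simp only [List.nil_append, dedupeT, dedupeSecT, hb, if_true]
  | cons x xs ih =>
    intro seen lb
    have hx : (PySem.Str.startswith x "### " || PySem.Str.startswith x "#### ") = false := by
      simpa [isHeadingB] using h x (by simp)
    have hxs : ∀ y ∈ xs, isHeadingB y = false := fun y hy => h y (by simp [hy])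
    simp only [List.cons_append, dedupeT, dedupeSecT, hx, Bool.false_eq_true, if_false]
    by_cases hn : normLine x = ""
    · cases lb <;> simp [hn, ih hxs]
    · by_cases hc : normLine x ∈ seen
      · simp [hn, hc, ih hxs]
      · simp [hn, hc, ih hxs]

-- B's main loop step (named for the proofs)
def mainStepB (st : List String × List String) (line : String) : List String × List String :=
  if isHeadingB line then (st.1 ++ dedupeSectionB st.2 ++ [line], ([] : List String))
  else (st.1, st.2 ++ [line])

theorem mainB_acc (rest : List String) : ∀ (acc sec : List String),
    (rest.foldl mainStepB (acc, sec)).1 ++ dedupeSectionB (rest.foldl mainStepB (acc, sec)).2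
      = acc ++ ((rest.foldl mainStepB ([], sec)).1 ++ dedupeSectionB (rest.foldl mainStepB ([], sec)).2) := by
  induction rest with
  | nil => intro acc sec; simp
  | cons l ls ih =>
    intro acc sec
    cases hl : isHeadingB l with
    | true =>
      simp only [List.foldl_cons, mainStepB, hl, if_true]
      rw [ih (acc ++ dedupeSectionB sec ++ [l]) [], ih (([] : List String) ++ dedupeSectionB sec ++ [l]) []]
      simp
    | false =>
      simp only [List.foldl_cons, mainStepB, hl, Bool.false_eq_true, if_false]
      exact ih acc (sec ++ [l])

theorem mainB_eq_dedupeT (rest : List String) : ∀ (sec : List String),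
    (∀ x ∈ sec, isHeadingB x = false) →
    (rest.foldl mainStepB ([], sec)).1 ++ dedupeSectionB (rest.foldl mainStepB ([], sec)).2
      = dedupeT PySem.Set.empty false (sec ++ rest) := by
  induction rest with
  | nil =>
    intro sec hsec
    simp [dedupeSectionB, foldB_eq_dedupeSecT, dedupeT_no_heading sec hsec]
  | cons l ls ih =>
    intro sec hsec
    cases hl : isHeadingB l with
    | true =>
      simp only [List.foldl_cons, mainStepB, hl, if_true, List.nil_append]
      rw [mainB_acc ls (dedupeSectionB sec ++ [l]) []]
      rw [ih [] (by intro x hx; simp at hx)]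
      rw [dedupeT_split sec hsec hl ls]
      simp [dedupeSectionB, foldB_eq_dedupeSecT]
    | false =>
      simp only [List.foldl_cons, mainStepB, hl, Bool.false_eq_true, if_false]
      have hsec' : ∀ x ∈ sec ++ [l], isHeadingB x = false := by
        intro x hx
        rcases List.mem_append.mp hx with h1 | h1
        · exact hsec x h1
        · simp only [List.mem_singleton] at h1
          subst h1
          exact hl
      rw [ih (sec ++ [l]) hsec']
      simp

-- A's conversion loop is the map of convertLineB
theorem convFold (lines : List String) :
    lines.foldl (fun converted line =>
      if PySem.Str.startswith line "## " then converted ++ [convertHeadingLevel line 3]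
      else if PySem.Str.startswith line "### " then converted ++ [convertHeadingLevel line 4]
      else converted ++ [line]) [] = lines.map convertLineB := by
  have h : (fun (converted : List String) line =>
      if PySem.Str.startswith line "## " then converted ++ [convertHeadingLevel line 3]
      else if PySem.Str.startswith line "### " then converted ++ [convertHeadingLevel line 4]
      else converted ++ [line])
      = fun (converted : List String) line => converted ++ [convertLineB line] := by
    funext acc l
    simp only [convertLineB]
    split_ifs <;> rfl
  rw [h, PySem.List.foldl_append_singleton_eq_map]
  simp

-- ===== VERDICT (by name: the statement is the Claim_ definition above) =====
theorem to_appendix_sections_py_spec : Claim_equal_to_appendix_sections_py := by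
  intro lines _
  unfold Spec_to_appendix_sections_py to_appendix_sections_py to_appendix_sections_py_alt
  rw [convFold]
  unfold dedupeAppendixLines
  rw [foldA_eq_dedupeT]
  have hmain := mainB_eq_dedupeT (lines.map convertLineB) [] (by intro x hx; simp at hx)
  simp only [List.nil_append] at hmain ⊢
  rw [show (lines.map convertLineB).foldl
      (fun (st : List String × List String) line =>
        if isHeadingB line then (st.1 ++ dedupeSectionB st.2 ++ [line], ([] : List String))
        else (st.1, st.2 ++ [line])) ([], []) = (lines.map convertLineB).foldl mainStepB ([], []) from rfl]
  rw [hmain]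
  rfl
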